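-- pv_equiv track=rewrite | github.com/COLA-Laboratory/RNAInvBench | rna_design_algorithms/LMM/uti.py | integrate_sequences
-- ===== SOURCE A (Python) =====
-- def integrate_sequences(current_seq, positions, target):
--     # Replace specific positions in current_seq with <mask>
--     modified_seq_parts = [
--         "<mask>" if i in positions else char
--         for i, char in enumerate(current_seq)
--     ]
--
--     # Convert the list back to a string
--     modified_seq = ''.join(modified_seq_parts)
--
--     # Concatenate the modified sequence with the target sequence, adding <eos> in between
--     final_seq = f"{modified_seq}<eos>{target}"
--     return final_seq
-- ===== SOURCE B (Python) =====
-- def integrate_sequences(current_seq, positions, target):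
--     # Mutate a char list at the given positions instead of scanning every character.
--     seq_list = list(current_seq)
--     n = len(seq_list)
--     for pos in positions:
--         if 0 <= pos < n:
--             seq_list[pos] = "<mask>"
--     return "".join(seq_list) + "<eos>" + target
-- ===== Notes on version B (the rewrite author's own statement) =====
-- stated objective: alternative
-- what changed: B mutates a char list at the listed positions (with an in-range check, skipping indices that match no character just as A's membership test does) instead of scanning every character and testing membership in positions.
import Mathlib
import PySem

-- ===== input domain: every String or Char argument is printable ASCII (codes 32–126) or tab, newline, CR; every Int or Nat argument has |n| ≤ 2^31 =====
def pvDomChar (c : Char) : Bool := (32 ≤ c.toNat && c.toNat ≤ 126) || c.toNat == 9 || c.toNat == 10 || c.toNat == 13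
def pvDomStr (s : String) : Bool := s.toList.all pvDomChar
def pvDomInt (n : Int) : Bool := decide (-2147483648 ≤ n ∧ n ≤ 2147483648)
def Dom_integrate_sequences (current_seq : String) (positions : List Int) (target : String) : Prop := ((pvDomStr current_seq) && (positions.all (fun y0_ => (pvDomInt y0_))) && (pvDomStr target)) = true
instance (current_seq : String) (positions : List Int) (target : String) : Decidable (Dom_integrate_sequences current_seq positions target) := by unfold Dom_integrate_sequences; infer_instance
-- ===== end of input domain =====

-- B replaces A's per-character scan with membership test by a single mutation pass over
-- the positions on a copied char list (alternative decomposition; same result).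

-- ===== PORT A =====
-- A: comprehension over enumerate(current_seq), "<mask>" if i in positions else char; join; append "<eos>"+target
def integrate_sequences (current_seq : String) (positions : List Int) (target : String) : String :=
  let modified_seq_parts : List (List Char) :=
    (PySem.List.enumerate current_seq.toList).map
      (fun ic => if positions.contains ic.1 then "<mask>".toList else [ic.2])
  String.ofList (modified_seq_parts.flatten ++ "<eos>".toList ++ target.toList)

-- ===== PORT B =====
-- B: seq_list = list(current_seq); for pos in positions: if 0 <= pos < n: seq_list[pos] = "<mask>"; join; append
def integrate_sequences_alt (current_seq : String) (positions : List Int) (target : String) : String :=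
  let seq_list : List (List Char) := current_seq.toList.map (fun c => [c])
  let n : Int := (seq_list.length : Int)
  let final := positions.foldl
    (fun acc pos => if 0 ≤ pos ∧ pos < n then acc.set pos.toNat "<mask>".toList else acc) seq_list
  String.ofList (final.flatten ++ "<eos>".toList ++ target.toList)

-- ===== PRECONDITION & SPEC =====
def Spec_integrate_sequences (current_seq : String) (positions : List Int) (target : String) (out : String) : Prop := out = integrate_sequences_alt current_seq positions target
instance (current_seq : String) (positions : List Int) (target : String) (out : String) : Decidable (Spec_integrate_sequences current_seq positions target out) := by unfold Spec_integrate_sequences; infer_instance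

-- ===== CLAIM (what is proved, stated in full; the proofs are below) =====
def Claim_equal_integrate_sequences : Prop := ∀ (current_seq : String) (positions : List Int) (target : String), Dom_integrate_sequences current_seq positions target → Spec_integrate_sequences current_seq positions target (integrate_sequences current_seq positions target)

-- ===== LEMMAS AND PROOFS =====

-- B's loop preserves the length of the list it mutates.
theorem pv_foldl_set_length (ps : List Int) (n : Int) (m : List Char) (l : List (List Char)) :
    (ps.foldl (fun acc pos => if 0 ≤ pos ∧ pos < n then acc.set pos.toNat m else acc) l).length
      = l.length := by
  induction ps generalizing l with
  | nil => rfl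
  | cons p ps ih =>
    simp only [List.foldl_cons]
    split_ifs
    · rw [ih, List.length_set]
    · rw [ih]

-- Element i of B's loop result: m iff i occurs in positions (in range), else the original slot.
theorem pv_foldl_set_getD (ps : List Int) (n : Int) (m : List Char) (l : List (List Char))
    (hn : (l.length : Int) = n) (i : Nat) (hi : i < l.length) :
    (ps.foldl (fun acc pos => if 0 ≤ pos ∧ pos < n then acc.set pos.toNat m else acc) l).getD i []
      = if ps.contains (i : Int) then m else l.getD i [] := by
  induction ps generalizing l with
  | nil => simp
  | cons p ps ih =>
    simp only [List.foldl_cons, List.contains_cons]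
    by_cases hin : 0 ≤ p ∧ p < n
    · rw [if_pos hin]
      rw [ih (l.set p.toNat m) (by simpa using hn) (by simpa using hi)]
      by_cases hpi : p.toNat = i
      · have hp : p = (i : Int) := by omega
        subst hp
        simp only [hpi]
        simp only [BEq.rfl, Bool.true_or, if_pos]
        split
        · rfl
        · simp [List.getD, hi]
      · have hne : (i : Int) ≠ p := by omega
        simp [List.getD, List.getElem?_set_ne hpi, hne]
    · rw [if_neg hin]
      rw [ih l hn hi]
      have hne : (i : Int) ≠ p := by omega
      simp [hne]

-- The two part lists agree elementwise, hence are equal.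
theorem pv_parts_eq (s : List Char) (ps : List Int) :
    ps.foldl (fun acc pos =>
        if 0 ≤ pos ∧ pos < (((s.map (fun c => [c])).length : Nat) : Int)
        then acc.set pos.toNat "<mask>".toList else acc) (s.map (fun c => [c]))
      = (PySem.List.enumerate s).map (fun ic => if ps.contains ic.1 then "<mask>".toList else [ic.2]) := by
  apply List.ext_getElem
  · rw [pv_foldl_set_length]
    simp [PySem.List.length_enumerate]
  · intro i h1 h2
    have hlen : i < (s.map (fun c => [c])).length := by
      rw [pv_foldl_set_length] at h1; exact h1
    have hi : i < s.length := by simpa using hlen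
    rw [← List.getD_eq_getElem _ [] h1,
        pv_foldl_set_getD ps _ "<mask>".toList (s.map (fun c => [c])) rfl i hlen,
        List.getElem_map, PySem.List.getElem_enumerate]
    simp [hi]

-- ===== VERDICT (by name: the statement is the Claim_ definition above) =====
theorem integrate_sequences_spec : Claim_equal_integrate_sequences := by
  intro current_seq positions target _
  show _ = _
  unfold integrate_sequences integrate_sequences_alt
  simp only
  rw [pv_parts_eq current_seq.toList positions]
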